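-- pv_equiv track=rewrite | github.com/bavalpey/codefights | core/listBackwoods/crossingSum.py | crossingSum
-- ===== SOURCE A (Python) =====
-- def crossingSum(matrix, a, b):
--     sm = 0
--     for row in range(len(matrix)):
--         for col in range(len(matrix[0])):
--             if row == a:
--                 sm += matrix[row][col]
--             elif col == b:
--                 sm += matrix[row][col]
--     return sm
-- ===== SOURCE B (Python) =====
-- def crossingSum(matrix, a, b):
--     total = 0
--     if 0 <= a < len(matrix):
--         total += sum(matrix[a])
--     if matrix and 0 <= b < len(matrix[0]):
--         total += sum(row[b] for row in matrix)
--         if 0 <= a < len(matrix):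
--             total -= matrix[a][b]
--     return total
-- ===== Notes on version B (the rewrite author's own statement) =====
-- stated objective: faster
-- what changed: Replaces the full nested scan of every cell with a direct sum of row a plus column b minus the intersection cell, guarded by range checks.
-- intended difference: On ragged matrices whose row a is longer than the first row, A silently sums only the first len(matrix[0]) entries of row a; B sums the whole row a, which is the intended crossing sum. — e.g. on crossingSum([[1], [2, 3]], 1, 0): A returns 3, B returns 6
import Mathlib
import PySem

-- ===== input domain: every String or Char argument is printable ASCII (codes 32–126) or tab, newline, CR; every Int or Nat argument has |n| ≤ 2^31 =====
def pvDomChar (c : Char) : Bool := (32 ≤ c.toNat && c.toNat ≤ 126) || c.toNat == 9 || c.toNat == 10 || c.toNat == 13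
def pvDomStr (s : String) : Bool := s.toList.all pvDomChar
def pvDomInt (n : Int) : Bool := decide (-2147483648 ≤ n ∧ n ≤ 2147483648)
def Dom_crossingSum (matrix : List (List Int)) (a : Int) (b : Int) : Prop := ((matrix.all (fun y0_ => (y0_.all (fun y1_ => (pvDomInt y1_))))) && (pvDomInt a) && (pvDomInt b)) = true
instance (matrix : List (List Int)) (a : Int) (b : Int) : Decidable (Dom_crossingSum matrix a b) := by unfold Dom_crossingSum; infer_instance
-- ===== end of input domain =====

-- B computes row a plus column b minus the intersection cell directly with guarded sums instead of A's scan of every cell; on ragged input whose row a is longer than the first row, B sums all of row a where A truncates.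


-- ===== PORT A =====
def crossingSum (matrix : List (List Int)) (a : Int) (b : Int) : Int :=
  (PySem.List.pyRange 0 (matrix.length : Int) 1).foldl (fun sm row =>
    (PySem.List.pyRange 0 ((PySem.List.pyGetD matrix 0 []).length : Int) 1).foldl (fun sm col =>
      if row = a then sm + PySem.List.pyGetD (PySem.List.pyGetD matrix row []) col 0
      else if col = b then sm + PySem.List.pyGetD (PySem.List.pyGetD matrix row []) col 0
      else sm) sm) 0

-- ===== PORT B =====
def crossingSum_alt (matrix : List (List Int)) (a : Int) (b : Int) : Int :=
  let n : Int := matrix.length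
  let total : Int := if 0 ≤ a ∧ a < n then (PySem.List.pyGetD matrix a []).sum else 0
  if matrix ≠ [] ∧ 0 ≤ b ∧ b < ((PySem.List.pyGetD matrix 0 []).length : Int) then
    let total := total + matrix.foldl (fun acc row => acc + PySem.List.pyGetD row b 0) 0
    if 0 ≤ a ∧ a < n then total - PySem.List.pyGetD (PySem.List.pyGetD matrix a []) b 0 else total
  else total

-- ===== PRECONDITION & SPEC =====
-- Pre_ is exactly where A returns: it excludes only ragged inputs on which A raises IndexError
-- (row a shorter than the first row, or some row lacking column b when column b is scanned).
def Pre_crossingSum (matrix : List (List Int)) (a : Int) (b : Int) : Prop :=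
  ((0 ≤ a ∧ a < (matrix.length : Int)) →
    (matrix.headD []).length ≤ (matrix.getD a.toNat []).length)
  ∧ ((0 ≤ b ∧ b < ((matrix.headD []).length : Int)) → ∀ row ∈ matrix, b < (row.length : Int))
instance (matrix : List (List Int)) (a : Int) (b : Int) : Decidable (Pre_crossingSum matrix a b) := by unfold Pre_crossingSum; infer_instance
def pvWitness_crossingSum : List (List Int) × Int × Int := ([[1, 2], [3, 4]], 0, 1)

-- On ragged matrices whose row a is longer than the first row with a nonzero tail beyond the first
-- row's length, A silently sums only the first len(matrix[0]) entries of row a; B sums the whole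
-- row a, which is the intended crossing sum.
def D_crossingSum (matrix : List (List Int)) (a : Int) (b : Int) : Prop :=
  (0 ≤ a ∧ a < (matrix.length : Int))
  ∧ ((matrix.getD a.toNat []).drop (matrix.headD []).length).sum ≠ 0
instance (matrix : List (List Int)) (a : Int) (b : Int) : Decidable (D_crossingSum matrix a b) := by unfold D_crossingSum; infer_instance

def Spec_crossingSum (matrix : List (List Int)) (a : Int) (b : Int) (out : Int) : Prop := ¬ D_crossingSum matrix a b → out = crossingSum_alt matrix a b
instance (matrix : List (List Int)) (a : Int) (b : Int) (out : Int) : Decidable (Spec_crossingSum matrix a b out) := by unfold Spec_crossingSum; infer_instance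

def pvDiffWitness_crossingSum : List (List Int) × Int × Int := ([[1], [2, 3]], 1, 0)
def pvDiffWitnessOut_crossingSum : Int × Int := (3, 6)

-- ===== CLAIM (what is proved, stated in full; the proofs are below) =====
def Claim_unchanged_crossingSum : Prop := ∀ (matrix : List (List Int)) (a : Int) (b : Int), Dom_crossingSum matrix a b → Pre_crossingSum matrix a b → Spec_crossingSum matrix a b (crossingSum matrix a b)
def Claim_changed_crossingSum : Prop := Dom_crossingSum (pvDiffWitness_crossingSum.1) (pvDiffWitness_crossingSum.2.1) (pvDiffWitness_crossingSum.2.2) ∧ Pre_crossingSum (pvDiffWitness_crossingSum.1) (pvDiffWitness_crossingSum.2.1) (pvDiffWitness_crossingSum.2.2) ∧ D_crossingSum (pvDiffWitness_crossingSum.1) (pvDiffWitness_crossingSum.2.1) (pvDiffWitness_crossingSum.2.2) ∧ crossingSum (pvDiffWitness_crossingSum.1) (pvDiffWitness_crossingSum.2.1) (pvDiffWitness_crossingSum.2.2) = pvDiffWitnessOut_crossingSum.1 ∧ crossingSum_alt (pvDiffWitness_crossingSum.1) (pvDiffWitness_crossingSum.2.1) (pvDiffWitness_crossingSum.2.2)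 = pvDiffWitnessOut_crossingSum.2 ∧ pvDiffWitnessOut_crossingSum.1 ≠ pvDiffWitnessOut_crossingSum.2
def Claim_exact_crossingSum : Prop := ∀ (matrix : List (List Int)) (a : Int) (b : Int), Dom_crossingSum matrix a b → Pre_crossingSum matrix a b → D_crossingSum matrix a b → crossingSum matrix a b ≠ crossingSum_alt matrix a b

-- ===== LEMMAS AND PROOFS =====

theorem map_getD_range_take {α : Type} (xs : List α) (d : α) (m : Nat) (hm : m ≤ xs.length) :
    (List.range m).map (fun i => xs.getD i d) = xs.take m := by
  apply List.ext_getElem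
  · simp [hm]
  · intro i h1 h2
    have hi : i < m := by simpa using h1
    have hix : i < xs.length := by omega
    simp [List.getD_eq_getElem?_getD, List.getElem?_eq_getElem hix]

theorem map_getD_range_self {α : Type} (xs : List α) (d : α) :
    (List.range xs.length).map (fun i => xs.getD i d) = xs := by
  rw [map_getD_range_take xs d xs.length le_rfl, List.take_length]

-- the contribution of row r to A's running total (c = len(matrix[0]))
def pvDelta (matrix : List (List Int)) (a b : Int) (c : Nat) (r : Nat) : Int :=
  if (r : Int) = a then ((matrix.getD r []).take c).sum
  else if 0 ≤ b ∧ b < (c : Int) then PySem.List.pyGetD (matrix.getD r []) b 0 else 0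

-- A's running total after the first n rows, in closed form
def pvTarget (matrix : List (List Int)) (a b : Int) (c : Nat) (n : Nat) : Int :=
  (if 0 ≤ a ∧ a < (n : Int) then ((matrix.getD a.toNat []).take c).sum else 0)
  + (if 0 ≤ b ∧ b < (c : Int) then
      ((List.range n).map (fun r => PySem.List.pyGetD (matrix.getD r []) b 0)).sum
      - (if 0 ≤ a ∧ a < (n : Int) then PySem.List.pyGetD (matrix.getD a.toNat []) b 0 else 0)
     else 0)

-- B's value, in closed form (full row a instead of its first c entries)
def pvTargetFull (matrix : List (List Int)) (a b : Int) (c : Nat) (n : Nat) : Int :=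
  (if 0 ≤ a ∧ a < (n : Int) then (matrix.getD a.toNat []).sum else 0)
  + (if 0 ≤ b ∧ b < (c : Int) then
      ((List.range n).map (fun r => PySem.List.pyGetD (matrix.getD r []) b 0)).sum
      - (if 0 ≤ a ∧ a < (n : Int) then PySem.List.pyGetD (matrix.getD a.toNat []) b 0 else 0)
     else 0)

theorem inner_col_eq (R : List Int) (b sm : Int) (n : Nat) :
    (List.range n).foldl
      (fun sm (col : Nat) => if (col : Int) = b then sm + R.getD col 0 else sm) sm
    = sm + (if 0 ≤ b ∧ b < (n : Int) then PySem.List.pyGetD R b 0 else 0) := by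
  induction n with
  | zero =>
    simp only [List.range_zero, List.foldl_nil, Nat.cast_zero]
    rw [if_neg (by omega)]
    ring
  | succ n ih =>
    rw [List.range_succ, List.foldl_append, ih]
    simp only [List.foldl_cons, List.foldl_nil]
    by_cases h : (n : Int) = b
    · rw [if_pos h, if_neg (by omega), if_pos (by constructor <;> omega), ← h,
        PySem.List.pyGetD_natCast]
      ring
    · have hiff : ((0:Int) ≤ b ∧ b < ((n+1 : Nat) : Int)) ↔ ((0:Int) ≤ b ∧ b < (n : Int)) := by
        push_cast; omega
      rw [if_neg h]
      simp only [hiff]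

theorem inner_eq (R : List Int) (row a b sm : Int) (m : Nat) (hm : row = a → m ≤ R.length) :
    (List.range m).foldl
      (fun sm (col : Nat) =>
        if row = a then sm + R.getD col 0
        else if (col : Int) = b then sm + R.getD col 0
        else sm) sm
    = sm + (if row = a then (R.take m).sum
            else if 0 ≤ b ∧ b < (m : Int) then PySem.List.pyGetD R b 0 else 0) := by
  by_cases h : row = a
  · simp only [h, if_true]
    rw [PySem.List.foldl_add (List.range m) (fun col : Nat => R.getD col 0) sm]
    rw [map_getD_range_take R 0 m (hm h)]
  · simp only [h, if_false]
    exact inner_col_eq R b sm m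

theorem sum_delta_eq_target (matrix : List (List Int)) (a b : Int) (c : Nat) (n : Nat) :
    ((List.range n).map (pvDelta matrix a b c)).sum = pvTarget matrix a b c n := by
  induction n with
  | zero =>
    have h : ¬((0:Int) ≤ a ∧ a < (0 : Int)) := by omega
    simp [pvTarget, h]
  | succ n ih =>
    rw [List.range_succ, List.map_append, List.sum_append, ih]
    simp only [List.map_cons, List.map_nil, List.sum_cons, List.sum_nil, add_zero]
    unfold pvDelta pvTarget
    rw [List.range_succ, List.map_append, List.sum_append]
    simp only [List.map_cons, List.map_nil, List.sum_cons, List.sum_nil, add_zero]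
    by_cases ha : (n : Int) = a
    · have hta : a.toNat = n := by omega
      rw [hta]
      split_ifs <;> (try (exfalso; omega)) <;> ring
    · split_ifs <;> (try (exfalso; omega)) <;> ring

theorem head_len_eq (matrix : List (List Int)) :
    (PySem.List.pyGetD matrix 0 []).length = (matrix.headD []).length := by
  rw [PySem.List.pyGetD_zero]
  cases matrix <;> simp

theorem crossingSum_closed (matrix : List (List Int)) (a b : Int)
    (H : (0 ≤ a ∧ a < (matrix.length : Int)) →
      (matrix.headD []).length ≤ (matrix.getD a.toNat []).length) :
    crossingSum matrix a b = pvTarget matrix a b (matrix.headD []).length matrix.length := by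
  unfold crossingSum
  simp only [PySem.List.pyRange_zero_nat, List.foldl_map, head_len_eq matrix]
  rw [PySem.List.foldl_congr_mem (List.range matrix.length) _
    (fun sm r => sm + pvDelta matrix a b (matrix.headD []).length r) 0 ?_]
  · rw [PySem.List.foldl_add (List.range matrix.length)
      (pvDelta matrix a b (matrix.headD []).length) 0, sum_delta_eq_target]
    ring
  · intro sm r hr
    have hrlen : r < matrix.length := List.mem_range.mp hr
    have hm : (r : Int) = a → (matrix.headD []).length ≤ (matrix.getD r []).length := by
      intro hra
      have hta : a.toNat = r := by omega
      rw [← hta]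
      exact H ⟨by omega, by omega⟩
    simp only [PySem.List.pyGetD_natCast]
    rw [inner_eq (matrix.getD r []) (r : Int) a b sm (matrix.headD []).length hm]
    rfl

theorem alt_closed (matrix : List (List Int)) (a b : Int) :
    crossingSum_alt matrix a b
      = pvTargetFull matrix a b (matrix.headD []).length matrix.length := by
  unfold crossingSum_alt pvTargetFull
  dsimp only
  have hguard : (matrix ≠ [] ∧ 0 ≤ b ∧ b < ((PySem.List.pyGetD matrix 0 []).length : Int))
      ↔ (0 ≤ b ∧ b < ((matrix.headD []).length : Int)) := by
    rw [head_len_eq matrix]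
    cases matrix with
    | nil =>
      simp only [List.headD_nil, List.length_nil, Nat.cast_zero]
      constructor
      · exact fun h => h.2
      · intro h; exact absurd h.2 (by omega)
    | cons R M => simp
  have hmap : (List.range matrix.length).map (fun r => PySem.List.pyGetD (matrix.getD r []) b 0)
      = matrix.map (fun row => PySem.List.pyGetD row b 0) := by
    conv_rhs => rw [← map_getD_range_self matrix [], List.map_map]
    rfl
  have hcol : matrix.foldl (fun acc row => acc + PySem.List.pyGetD row b 0) 0
      = (matrix.map (fun row => PySem.List.pyGetD row b 0)).sum := by
    rw [PySem.List.foldl_add matrix (fun row => PySem.List.pyGetD row b 0) 0]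
    ring
  simp only [hguard, hcol, hmap]
  by_cases hA : 0 ≤ a ∧ a < (matrix.length : Int)
  · have hlt : a.toNat < matrix.length := by omega
    have hge : PySem.List.pyGetD matrix a [] = matrix.getD a.toNat [] := by
      rw [PySem.List.pyGetD_eq_getElem matrix [] hA.1 (by exact_mod_cast hA.2),
        List.getD_eq_getElem _ _ hlt]
    simp only [if_pos hA, hge]
    by_cases hB : 0 ≤ b ∧ b < ((matrix.headD []).length : Int)
    · simp only [if_pos hB]; ring
    · simp only [if_neg hB]; ring
  · simp only [if_neg hA]
    by_cases hB : 0 ≤ b ∧ b < ((matrix.headD []).length : Int)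
    · simp only [if_pos hB]; ring
    · simp only [if_neg hB]; ring

theorem take_add_drop_sum (R : List Int) (c : Nat) :
    (R.take c).sum + (R.drop c).sum = R.sum := by
  rw [← List.sum_append, List.take_append_drop]

-- ===== VERDICT (by name: the statement is the Claim_ definition above) =====
theorem crossingSum_spec : Claim_unchanged_crossingSum := by
  intro matrix a b _hdom hpre
  unfold Spec_crossingSum
  intro hnd
  rw [crossingSum_closed matrix a b hpre.1, alt_closed matrix a b]
  unfold pvTarget pvTargetFull
  by_cases hA : 0 ≤ a ∧ a < (matrix.length : Int)
  · have hds : ((matrix.getD a.toNat []).drop (matrix.headD []).length).sum = 0 := by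
      by_contra h
      exact hnd (by unfold D_crossingSum; exact ⟨hA, h⟩)
    have htake : ((matrix.getD a.toNat []).take (matrix.headD []).length).sum
        = (matrix.getD a.toNat []).sum := by
      have := take_add_drop_sum (matrix.getD a.toNat []) (matrix.headD []).length
      omega
    rw [htake]
  · simp only [if_neg hA]

theorem crossingSum_changed : Claim_changed_crossingSum := by
  unfold Claim_changed_crossingSum; decide

theorem crossingSum_tight : Claim_exact_crossingSum := by
  intro matrix a b _hdom hpre hD
  rw [crossingSum_closed matrix a b hpre.1, alt_closed matrix a b]
  unfold pvTarget pvTargetFull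
  have hA := hD.1
  simp only [if_pos hA]
  intro heq
  have hsum : ((matrix.getD a.toNat []).take (matrix.headD []).length).sum
      = (matrix.getD a.toNat []).sum := add_right_cancel heq
  have := take_add_drop_sum (matrix.getD a.toNat []) (matrix.headD []).length
  exact hD.2 (by omega)
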